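-- pv_equiv track=rewrite | github.com/rnscks/TurningMillingGenerator | core/tree/io.py | classify_trees_by_step_count
-- ===== SOURCE A (Python) =====
-- from typing import List, Dict, Optional
--
-- def classify_trees_by_step_count(trees: List[Dict]) -> Dict[int, List[int]]:
--     """트리를 step(s) 노드 개수별로 분류. Returns {step_count: [tree_indices]}."""
--     result = {}
--     for i, tree in enumerate(trees):
--         s_count = sum(1 for n in tree.get('nodes', []) if n.get('label') == 's')
--         if s_count not in result:
--             result[s_count] = []
--         result[s_count].append(i)
--     return result
-- ===== SOURCE B (Python) =====
-- def classify_trees_by_step_count(trees):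
--     """트리를 step(s) 노드 개수별로 분류. Returns {step_count: [tree_indices]}."""
--     counts = [sum(1 for n in t.get('nodes', []) if n.get('label') == 's') for t in trees]
--     keys = list(dict.fromkeys(counts))
--     return {k: [i for i, c in enumerate(counts) if c == k] for k in keys}
-- ===== Notes on version B (the rewrite author's own statement) =====
-- stated objective: alternative
-- what changed: A builds the groups incrementally in one pass with a dict of append-lists; B first computes the list of per-tree s-counts, takes its ordered dedup as the keys, and builds each group by a per-key scan of the counts list (a dict comprehension), relying on first-occurrence dedup order to reproduce A's key order.
import Mathlib
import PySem

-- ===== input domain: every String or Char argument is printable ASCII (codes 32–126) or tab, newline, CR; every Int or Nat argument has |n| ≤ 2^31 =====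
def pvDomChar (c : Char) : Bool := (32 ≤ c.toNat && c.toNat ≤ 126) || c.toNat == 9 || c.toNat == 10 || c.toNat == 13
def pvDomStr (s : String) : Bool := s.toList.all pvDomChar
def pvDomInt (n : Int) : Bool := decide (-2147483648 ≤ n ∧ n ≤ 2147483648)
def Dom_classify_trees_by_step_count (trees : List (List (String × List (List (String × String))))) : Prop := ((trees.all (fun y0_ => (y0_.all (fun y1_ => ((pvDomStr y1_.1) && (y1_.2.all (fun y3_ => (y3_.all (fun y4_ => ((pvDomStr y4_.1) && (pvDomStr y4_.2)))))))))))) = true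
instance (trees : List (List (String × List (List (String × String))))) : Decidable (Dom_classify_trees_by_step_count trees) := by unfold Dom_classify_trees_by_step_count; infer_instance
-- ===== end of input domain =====

-- B replaces A's incremental dict-building loop by a two-phase decomposition:
-- compute the per-tree s-counts once, dedup them for the keys, and build each
-- group by a per-key scan of the counts (objective: alternative decomposition).


-- ===== PORT A =====
-- s_count = sum(1 for n in tree.get('nodes', []) if n.get('label') == 's')
-- (identical expression in A and in B; shared helper)
def pvSCount (tree : List (String × List (List (String × String)))) : Int :=
  ((PySem.Dict.mk tree).getD "nodes" []).foldl
    (fun acc n => if (PySem.Dict.mk n).get? "label" = some "s" then acc + 1 else acc) 0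

def classify_trees_by_step_count (trees : List (List (String × List (List (String × String))))) : List (Int × List Int) :=
  ((PySem.List.enumerate trees 0).foldl
    (fun (result : PySem.Dict Int (List Int)) p =>
      let s_count := pvSCount p.2
      let result1 := if result.contains s_count then result else result.insert s_count []
      result1.modify s_count [] (fun l => l ++ [p.1]))
    PySem.Dict.empty).items

-- ===== PORT B =====
def classify_trees_by_step_count_alt (trees : List (List (String × List (List (String × String))))) : List (Int × List Int) :=
  let counts := trees.map pvSCount
  let keys := PySem.List.dedup counts
  (keys.foldl
    (fun (d : PySem.Dict Int (List Int)) k =>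
      d.insert k (((PySem.List.enumerate counts 0).filter (fun p => p.2 == k)).map (·.1)))
    PySem.Dict.empty).items

-- ===== PRECONDITION & SPEC =====
def Spec_classify_trees_by_step_count (trees : List (List (String × List (List (String × String))))) (out : List (Int × List Int)) : Prop := out = classify_trees_by_step_count_alt trees
instance (trees : List (List (String × List (List (String × String))))) (out : List (Int × List Int)) : Decidable (Spec_classify_trees_by_step_count trees out) := by unfold Spec_classify_trees_by_step_count; infer_instance

-- ===== CLAIM (what is proved, stated in full; the proofs are below) =====
def Claim_equal_classify_trees_by_step_count : Prop := ∀ (trees : List (List (String × List (List (String × String))))), Dom_classify_trees_by_step_count trees → Spec_classify_trees_by_step_count trees (classify_trees_by_step_count trees)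

-- ===== LEMMAS AND PROOFS =====

-- A's loop body (conditional-insert-then-append) is exactly a modify-append.
theorem pv_step_eq (d : PySem.Dict Int (List Int)) (c i : Int) :
    (if d.contains c then d else d.insert c []).modify c [] (fun l => l ++ [i])
      = d.modify c [] (fun l => l ++ [i]) := by
  by_cases h : d.contains c = true
  · simp [h]
  · have h' : d.contains c = false := by simpa using h
    rw [if_neg (by simp [h'])]
    simp only [PySem.Dict.modify, PySem.Dict.getD_insert_self, PySem.Dict.insert_insert_self,
      PySem.Dict.getD_of_not_contains d [] h']

theorem pv_loopA_eq (l : List (Int × List (String × List (List (String × String)))))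
    (d : PySem.Dict Int (List Int)) :
    l.foldl (fun result p =>
      let s_count := pvSCount p.2
      let result1 := if result.contains s_count then result else result.insert s_count []
      result1.modify s_count [] (fun l => l ++ [p.1])) d
    = l.foldl (fun d p => d.modify (pvSCount p.2) [] (fun l => l ++ [p.1])) d := by
  simp only [pv_step_eq]

theorem pv_enumerate_map {α β : Type} (g : α → β) (xs : List α) (s : Int) :
    PySem.List.enumerate (xs.map g) s
      = (PySem.List.enumerate xs s).map (fun p => (p.1, g p.2)) := by
  induction xs generalizing s with
  | nil => rfl
  | cons x xs ih => simp [PySem.List.enumerate_cons, ih]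

theorem classify_trees_by_step_count_spec : Claim_equal_classify_trees_by_step_count := by
  intro trees _
  unfold Spec_classify_trees_by_step_count classify_trees_by_step_count classify_trees_by_step_count_alt
  rw [pv_loopA_eq]
  set counts := trees.map pvSCount with hcounts
  set L := (PySem.List.enumerate trees 0).map (fun p => (pvSCount p.2, p.1)) with hL
  have hloop : (PySem.List.enumerate trees 0).foldl
      (fun d p => d.modify (pvSCount p.2) [] (fun l => l ++ [p.1])) PySem.Dict.empty
      = L.foldl (fun d q => d.modify q.1 [] (fun l => l ++ [q.2])) PySem.Dict.empty := by
    rw [hL, List.foldl_map]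
  rw [hloop]
  set D := L.foldl (fun d q => d.modify q.1 [] (fun l => l ++ [q.2])) PySem.Dict.empty with hD
  have hfst : L.map (·.1) = counts := by
    rw [hL, List.map_map, hcounts]
    conv_rhs => rw [← PySem.List.map_snd_enumerate trees 0, List.map_map]
    rfl
  have hkeys : D.keys = PySem.List.dedup counts := by
    rw [hD]
    rw [PySem.Dict.keys_foldl_modify_key L Prod.fst [] (fun _ q => (fun l => l ++ [q.2]))]
    rw [PySem.List.dedup_eq_ofList]
    rw [show L.map Prod.fst = counts from hfst]
    rfl
  have hnodup : D.keys.Nodup := by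
    rw [hkeys]; exact PySem.List.nodup_dedup counts
  have hgetD : ∀ k : Int, D.getD k []
      = ((PySem.List.enumerate counts 0).filter (fun p => p.2 == k)).map (·.1) := by
    intro k
    rw [hD, PySem.Dict.getD_foldl_modify_append]
    rw [hcounts, pv_enumerate_map]
    simp [hL, List.filter_map, List.map_map, PySem.Dict.getD_empty]
    rfl
  rw [PySem.Dict.items_eq_map_keys D hnodup []]
  rw [PySem.Dict.items_foldl_insert_fresh (PySem.List.dedup counts) (fun k => k)
      (fun k => ((PySem.List.enumerate counts 0).filter (fun p => p.2 == k)).map (·.1))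
      PySem.Dict.empty
      (fun a _ => PySem.Dict.contains_empty a)
      (by simpa using PySem.List.nodup_dedup counts)]
  rw [hkeys]
  simp only [hgetD]
  show _ = PySem.Dict.empty.items ++ _
  rfl

-- ===== VERDICT (by name: the statement is the Claim_ definition above) =====
-- (verdict theorem is classify_trees_by_step_count_spec above)
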